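-- pv_equiv track=rewrite | github.com/mintropy/algorithm_pulzo | 지현배/0913/kakao/kakao6.py | solution
-- ===== SOURCE A (Python) =====
-- def solution(board, skill):
--     answer = 0
--     N = len(board)
--     M = len(board[0])
--     arr = [[0 for _ in range(M + 1)] for _ in range(N + 1)]
--     for sk in skill:
--         typ, r1, c1, r2, c2, degree = sk
--         sign = 1
--         if typ == 1: sign = -1
--         arr[r1][c1] += degree * sign
--         arr[r1][c2 + 1] += degree * -sign
--         arr[r2 + 1][c1] += degree * -sign
--         arr[r2 + 1][c2 + 1] += degree * sign
--     for i in range(N):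
--         cnt = 0
--         for j in range(M):
--             cnt += arr[i][j]
--             arr[i][j] = cnt
--     for j in range(M):
--         cnt = 0
--         for i in range(N):
--             cnt += arr[i][j]
--             board[i][j] += cnt
--             if (board[i][j] > 0): answer += 1
--     return answer
-- ===== SOURCE B (Python) =====
-- def solution(board, skill):
--     # Note: like A, this mutates board (return-value equivalence is what is claimed).
--     N = len(board)
--     M = len(board[0])
--     for typ, r1, c1, r2, c2, degree in skill:
--         delta = -degree if typ == 1 else degree
--         for r in range(r1, r2 + 1):
--             row = board[r]
--             for c in range(c1, c2 + 1):
--                 row[c] += delta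
--     return sum(1 for i in range(N) for j in range(M) if board[i][j] > 0)
-- ===== Notes on version B (the rewrite author's own statement) =====
-- stated objective: simpler
-- what changed: B replaces A's 2D difference-array corner updates followed by two prefix-sum passes with a direct per-skill rectangle sweep that adds the signed degree to every covered cell, then one plain count of positive cells.
-- outside the precondition, e.g. on solution([[1], [1], [1]], [[0, 2, 0, 0, 0, 5]]): A returns 2, B returns 3; on solution([[1, 1], [1, 1]], [[1, -1, 0, -1, 0, 1]]): A returns 4, B returns 3
import Mathlib
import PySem

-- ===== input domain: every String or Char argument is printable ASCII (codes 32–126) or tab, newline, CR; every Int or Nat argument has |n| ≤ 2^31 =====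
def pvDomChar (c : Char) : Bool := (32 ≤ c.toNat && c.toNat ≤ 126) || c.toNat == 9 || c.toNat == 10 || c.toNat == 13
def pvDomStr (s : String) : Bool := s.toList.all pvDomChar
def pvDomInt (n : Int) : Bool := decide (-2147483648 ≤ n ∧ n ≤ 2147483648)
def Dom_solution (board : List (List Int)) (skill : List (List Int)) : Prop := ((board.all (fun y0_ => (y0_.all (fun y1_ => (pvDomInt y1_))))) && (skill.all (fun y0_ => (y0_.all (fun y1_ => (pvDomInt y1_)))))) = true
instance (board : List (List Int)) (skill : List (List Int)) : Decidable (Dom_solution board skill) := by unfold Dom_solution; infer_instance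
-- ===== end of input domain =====

-- B replaces A's difference-array corner updates + two prefix-sum passes with a direct
-- per-skill rectangle sweep and a plain count of positive cells (objective: simpler).
-- Like A, the Python B mutates `board` in place; the equivalence claimed is about the return value.

-- ===== PORT A =====
-- grid helpers: arr[i][j] read, write and in-place add (indices guaranteed in range by Pre_)
def get2 (a : List (List Int)) (i j : Nat) : Int := (a.getD i []).getD j 0
def set2 (a : List (List Int)) (i j : Nat) (v : Int) : List (List Int) :=
  a.modify i (fun row => row.modify j (fun _ => v))
def add2 (a : List (List Int)) (i j : Nat) (v : Int) : List (List Int) :=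
  a.modify i (fun row => row.modify j (fun x => x + v))

-- one skill's four corner updates (Pre_ makes all coordinates nonnegative, so .toNat is exact:
-- no Python negative-index wraparound occurs inside Pre_; wrong-arity skills raise in Python and
-- are excluded by Pre_, the `| _ =>` branch is never reached on admitted inputs)
def stepA (arr : List (List Int)) (sk : List Int) : List (List Int) :=
  match sk with
  | [typ, r1, c1, r2, c2, degree] =>
    let sign : Int := if typ == 1 then -1 else 1
    let a1 := add2 arr r1.toNat c1.toNat (degree * sign)
    let a2 := add2 a1 r1.toNat (c2 + 1).toNat (degree * -sign)
    let a3 := add2 a2 (r2 + 1).toNat c1.toNat (degree * -sign)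
    add2 a3 (r2 + 1).toNat (c2 + 1).toNat (degree * sign)
  | _ => arr

-- `for j in range(M): cnt += arr[i][j]; arr[i][j] = cnt`
def rowStepF (i : Nat) (p : Int × List (List Int)) (j : Nat) : Int × List (List Int) :=
  let cnt := p.1 + get2 p.2 i j
  (cnt, set2 p.2 i j cnt)
def rowPass (M : Nat) (arr : List (List Int)) (i : Nat) : List (List Int) :=
  ((List.range M).foldl (rowStepF i) (0, arr)).2

-- `cnt += arr[i][j]; board[i][j] += cnt; if board[i][j] > 0: answer += 1`
def colStepF (arr : List (List Int)) (j : Nat) (q : Int × Int × List (List Int)) (i : Nat) :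
    Int × Int × List (List Int) :=
  let cnt := q.1 + get2 arr i j
  let b2 := add2 q.2.2 i j cnt
  let ans := if get2 b2 i j > 0 then q.2.1 + 1 else q.2.1
  (cnt, ans, b2)
def colPass (arr : List (List Int)) (N : Nat) (p : Int × List (List Int)) (j : Nat) :
    Int × List (List Int) :=
  let r := (List.range N).foldl (colStepF arr j) (0, p.1, p.2)
  (r.2.1, r.2.2)

def solution (board : List (List Int)) (skill : List (List Int)) : Int :=
  let N := board.length
  let M := ((PySem.List.pyGet? board 0).getD []).length   -- board[0]; Pre_ guarantees board ≠ []
  let arr1 := skill.foldl stepA (List.replicate (N + 1) (List.replicate (M + 1) (0 : Int)))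
  let arr2 := (List.range N).foldl (rowPass M) arr1
  ((List.range M).foldl (colPass arr2 N) (0, board)).1

-- ===== PORT B =====
-- add δ at every column index of cs (inner `for c in range(c1, c2+1): row[c] += delta`)
def rowAdd (δ : Int) (cs : List Int) (row : List Int) : List Int :=
  cs.foldl (fun row c => row.modify c.toNat (fun x => x + δ)) row

-- one skill: sweep the rectangle, adding the signed degree to every covered cell
-- (.toNat is exact inside Pre_: coordinates are nonnegative; `| _ =>` unreachable inside Pre_)
def stepB (b : List (List Int)) (sk : List Int) : List (List Int) :=
  match sk with
  | [typ, r1, c1, r2, c2, degree] =>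
    let δ : Int := if typ == 1 then -degree else degree
    (PySem.List.pyRange r1 (r2 + 1)).foldl
      (fun b r => b.modify r.toNat (rowAdd δ (PySem.List.pyRange c1 (c2 + 1)))) b
  | _ => b

def solution_alt (board : List (List Int)) (skill : List (List Int)) : Int :=
  let N := board.length
  let M := ((PySem.List.pyGet? board 0).getD []).length   -- board[0]; Pre_ guarantees board ≠ []
  let b := skill.foldl stepB board
  ((List.range N).map
    (fun i => (((List.range M).countP (fun j => decide (get2 b i j > 0)) : Nat) : Int))).sum

-- ===== PRECONDITION & SPEC =====
-- validity of one skill entry: exactly six fields with 0 ≤ r1 ≤ r2 < N and 0 ≤ c1 ≤ c2 < M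
def okSk (N M : Nat) (sk : List Int) : Bool :=
  match sk with
  | [_, r1, c1, r2, c2, _] =>
      decide (0 ≤ r1 ∧ r1 ≤ r2 ∧ r2 < (N : Int) ∧ 0 ≤ c1 ∧ c1 ≤ c2 ∧ c2 < (M : Int))
  | _ => false

-- Pre_ restricts to the problem's natural domain: a nonempty board whose rows all have at least
-- M = len(board[0]) cells, and six-field skills with 0 ≤ r1 ≤ r2 < N, 0 ≤ c1 ≤ c2 < M.  Outside
-- it A raises (empty board / rows shorter than M → IndexError, wrong skill arity → ValueError)
-- or A's returned value is an artefact of its implementation (Python negative-index wraparound,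
-- inverted rectangles with r1 > r2 or c1 > c2).
def Pre_solution (board : List (List Int)) (skill : List (List Int)) : Prop :=
  board ≠ [] ∧
  (∀ row ∈ board, (board.headD []).length ≤ row.length) ∧
  (∀ sk ∈ skill, okSk board.length (board.headD []).length sk = true)
instance (board : List (List Int)) (skill : List (List Int)) : Decidable (Pre_solution board skill) := by
  unfold Pre_solution; infer_instance

def pvWitness_solution : List (List Int) × List (List Int) := ([[1, -2], [0, 3]], [[1, 0, 0, 1, 1, 2]])

def Spec_solution (board : List (List Int)) (skill : List (List Int)) (out : Int) : Prop := out = solution_alt board skill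
instance (board : List (List Int)) (skill : List (List Int)) (out : Int) : Decidable (Spec_solution board skill out) := by unfold Spec_solution; infer_instance

-- ===== CLAIM (what is proved, stated in full; the proofs are below) =====
def Claim_equal_solution : Prop := ∀ (board : List (List Int)) (skill : List (List Int)), Dom_solution board skill → Pre_solution board skill → Spec_solution board skill (solution board skill)

-- ===== LEMMAS AND PROOFS =====

-- rectangular shape of a grid
-- every row reachable by the passes has at least m cells (rows may be longer: Pre_ only
-- guarantees len(board[0]) as a lower bound)
def Shape (a : List (List Int)) (n m : Nat) : Prop :=
  a.length = n ∧ ∀ k, k < n → m ≤ (a[k]?.getD []).length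

lemma get2_eq (a : List (List Int)) (i j : Nat) :
    get2 a i j = ((a[i]?.getD [])[j]?.getD 0) := by
  simp [get2, List.getD_eq_getElem?_getD]

lemma shape_modify (a : List (List Int)) (n m : Nat) (h : Shape a n m) (i : Nat)
    (f : List Int → List Int) (hf : ∀ row, (f row).length = row.length) :
    Shape (a.modify i f) n m := by
  obtain ⟨h1, h2⟩ := h
  refine ⟨by simp [List.length_modify, h1], fun k hk => ?_⟩
  rw [List.getElem?_modify]
  rcases hik : a[k]? with _ | row
  · simpa [hik] using h2 k hk
  · have hr := h2 k hk
    rw [hik] at hr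
    simp only [Option.getD_some] at hr
    by_cases hik2 : i = k <;> simp [hik2, hf, hr]

lemma shape_add2 (a : List (List Int)) (n m : Nat) (h : Shape a n m) (i j : Nat) (v : Int) :
    Shape (add2 a i j v) n m :=
  shape_modify a n m h i _ (fun row => by simp [List.length_modify])

lemma shape_set2 (a : List (List Int)) (n m : Nat) (h : Shape a n m) (i j : Nat) (v : Int) :
    Shape (set2 a i j v) n m :=
  shape_modify a n m h i _ (fun row => by simp [List.length_modify])

lemma get2_modify2 (a : List (List Int)) (n m : Nat) (h : Shape a n m) (i' j' : Nat)
    (hi : i' < n) (hj : j' < m) (g : Int → Int) (i j : Nat) :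
    get2 (a.modify i' (fun row => row.modify j' g)) i j
      = if i = i' ∧ j = j' then g (get2 a i j) else get2 a i j := by
  rw [get2_eq, get2_eq, List.getElem?_modify]
  by_cases hii : i = i'
  · subst hii
    have hlen : i < a.length := h.1 ▸ hi
    have hsome : a[i]? = some a[i] := List.getElem?_eq_getElem hlen
    have hrl : m ≤ a[i].length := by
      have := h.2 i hi
      rw [hsome] at this
      simpa using this
    rw [hsome]
    by_cases hjj : j = j'
    · subst hjj
      have hjl : j < a[i].length := lt_of_lt_of_le hj hrl
      simp [List.getElem?_eq_getElem hjl]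
    · have hjj' : ¬ (j' = j) := fun hc => hjj hc.symm
      simp [hjj, hjj']
  · have : ¬ (i' = i) := fun hc => hii hc.symm
    rcases hik : a[i]? with _ | row <;> simp [this, hii]

lemma get2_add2 (a : List (List Int)) (n m : Nat) (h : Shape a n m) (i' j' : Nat)
    (hi : i' < n) (hj : j' < m) (v : Int) (i j : Nat) :
    get2 (add2 a i' j' v) i j = get2 a i j + (if i = i' ∧ j = j' then v else 0) := by
  have := get2_modify2 a n m h i' j' hi hj (fun x => x + v) i j
  unfold add2
  rw [this]
  split_ifs <;> ring

lemma get2_set2 (a : List (List Int)) (n m : Nat) (h : Shape a n m) (i' j' : Nat)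
    (hi : i' < n) (hj : j' < m) (v : Int) (i j : Nat) :
    get2 (set2 a i' j' v) i j = if i = i' ∧ j = j' then v else get2 a i j := by
  have := get2_modify2 a n m h i' j' hi hj (fun _ => v) i j
  unfold set2
  rw [this]

-- the mathematical per-cell quantities
def corner (sk : List Int) (i j : Nat) : Int :=
  match sk with
  | [t, r1, _c1, r2, c2, d] =>
    ((if (i : Int) = r1 then 1 else 0) - (if (i : Int) = r2 + 1 then 1 else 0)) *
      ((if (j : Int) = _c1 then 1 else 0) - (if (j : Int) = c2 + 1 then 1 else 0)) *
      (d * (if t == 1 then -1 else 1))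
  | _ => 0

def contrib (sk : List Int) (i j : Nat) : Int :=
  match sk with
  | [t, r1, c1, r2, c2, d] =>
    (if t == 1 then -d else d) *
      (if r1 ≤ (i : Int) ∧ (i : Int) ≤ r2 ∧ c1 ≤ (j : Int) ∧ (j : Int) ≤ c2 then 1 else 0)
  | _ => 0

def Csum (skill : List (List Int)) (i j : Nat) : Int := (skill.map (fun sk => corner sk i j)).sum
def Tsum (skill : List (List Int)) (i j : Nat) : Int := (skill.map (fun sk => contrib sk i j)).sum

def colpre (arr : List (List Int)) (i j : Nat) : Int := ∑ t ∈ Finset.range i, get2 arr t j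

lemma okSk_shape {N M : Nat} {sk : List Int} (h : okSk N M sk = true) :
    ∃ t r1 c1 r2 c2 d, sk = [t, r1, c1, r2, c2, d] ∧
      0 ≤ r1 ∧ r1 ≤ r2 ∧ r2 < (N : Int) ∧ 0 ≤ c1 ∧ c1 ≤ c2 ∧ c2 < (M : Int) := by
  rcases sk with _ | ⟨t, sk⟩; · simp [okSk] at h
  rcases sk with _ | ⟨r1, sk⟩; · simp [okSk] at h
  rcases sk with _ | ⟨c1, sk⟩; · simp [okSk] at h
  rcases sk with _ | ⟨r2, sk⟩; · simp [okSk] at h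
  rcases sk with _ | ⟨c2, sk⟩; · simp [okSk] at h
  rcases sk with _ | ⟨d, sk⟩; · simp [okSk] at h
  rcases sk with _ | ⟨x, sk⟩
  · exact ⟨t, r1, c1, r2, c2, d, rfl, by simpa [okSk] using h⟩
  · simp [okSk] at h

lemma ite_and_mul_ind (P Q : Prop) [Decidable P] [Decidable Q] (v : Int) :
    (if P ∧ Q then v else 0) = (if P then (1 : Int) else 0) * (if Q then (1 : Int) else 0) * v := by
  split_ifs with h1 h2 h3 <;> simp_all

lemma get2_stepA (N M : Nat) (sk : List Int) (hok : okSk N M sk = true)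
    (arr : List (List Int)) (h : Shape arr (N + 1) (M + 1)) :
    Shape (stepA arr sk) (N + 1) (M + 1) ∧
      ∀ i j, get2 (stepA arr sk) i j = get2 arr i j + corner sk i j := by
  obtain ⟨t, r1, c1, r2, c2, d, rfl, h0, h1, h2, h3, h4, h5⟩ := okSk_shape hok
  have hr1 : r1.toNat < N + 1 := by omega
  have hr2 : (r2 + 1).toNat < N + 1 := by omega
  have hc1 : c1.toNat < M + 1 := by omega
  have hc2 : (c2 + 1).toNat < M + 1 := by omega
  simp only [stepA]
  have sh1 := shape_add2 _ _ _ h r1.toNat c1.toNat (d * (if t == 1 then -1 else 1))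
  have sh2 := shape_add2 _ _ _ sh1 r1.toNat (c2 + 1).toNat (d * -(if t == 1 then -1 else 1))
  have sh3 := shape_add2 _ _ _ sh2 (r2 + 1).toNat c1.toNat (d * -(if t == 1 then -1 else 1))
  have sh4 := shape_add2 _ _ _ sh3 (r2 + 1).toNat (c2 + 1).toNat (d * (if t == 1 then -1 else 1))
  refine ⟨sh4, fun i j => ?_⟩
  rw [get2_add2 _ _ _ sh3 _ _ hr2 hc2, get2_add2 _ _ _ sh2 _ _ hr2 hc1,
      get2_add2 _ _ _ sh1 _ _ hr1 hc2, get2_add2 _ _ _ h _ _ hr1 hc1]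
  have e1 : (i = r1.toNat ∧ j = c1.toNat) = (((i : Int) = r1) ∧ ((j : Int) = c1)) :=
    propext (by omega)
  have e2 : (i = r1.toNat ∧ j = (c2 + 1).toNat) = (((i : Int) = r1) ∧ ((j : Int) = c2 + 1)) :=
    propext (by omega)
  have e3 : (i = (r2 + 1).toNat ∧ j = c1.toNat) = (((i : Int) = r2 + 1) ∧ ((j : Int) = c1)) :=
    propext (by omega)
  have e4 : (i = (r2 + 1).toNat ∧ j = (c2 + 1).toNat) =
      (((i : Int) = r2 + 1) ∧ ((j : Int) = c2 + 1)) := propext (by omega)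
  simp only [e1, e2, e3, e4, corner, ite_and_mul_ind]
  ring

lemma get2_foldA (N M : Nat) (skill : List (List Int))
    (hok : ∀ sk ∈ skill, okSk N M sk = true) :
    ∀ (arr : List (List Int)), Shape arr (N + 1) (M + 1) →
      Shape (skill.foldl stepA arr) (N + 1) (M + 1) ∧
        ∀ i j, get2 (skill.foldl stepA arr) i j = get2 arr i j + Csum skill i j := by
  induction skill with
  | nil => intro arr h; exact ⟨h, fun i j => by simp [Csum]⟩
  | cons sk rest ih =>
    intro arr h
    obtain ⟨sh, hg⟩ := get2_stepA N M sk (hok sk (by simp)) arr h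
    obtain ⟨sh2, hg2⟩ := ih (fun s hs => hok s (by simp [hs])) (stepA arr sk) sh
    refine ⟨sh2, fun i j => ?_⟩
    rw [List.foldl_cons, hg2 i j, hg i j]
    simp [Csum]
    ring

lemma rowAux (n m : Nat) (arr : List (List Int)) (h : Shape arr n m) (i : Nat) (hi : i < n) :
    ∀ k, k ≤ m →
      (((List.range k).foldl (rowStepF i) (0, arr)).1 = ∑ t ∈ Finset.range k, get2 arr i t) ∧
      Shape ((List.range k).foldl (rowStepF i) (0, arr)).2 n m ∧
      (∀ i' j', get2 ((List.range k).foldl (rowStepF i) (0, arr)).2 i' j' =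
        if i' = i ∧ j' < k then ∑ t ∈ Finset.range (j' + 1), get2 arr i t else get2 arr i' j') := by
  intro k
  induction k with
  | zero => intro _; exact ⟨by simp, by simpa using h, fun i' j' => by simp⟩
  | succ k ih =>
    intro hk
    obtain ⟨h1, h2, h3⟩ := ih (by omega)
    rw [List.range_succ, List.foldl_append, List.foldl_cons, List.foldl_nil]
    set p := (List.range k).foldl (rowStepF i) (0, arr) with hp
    have hgik : get2 p.2 i k = get2 arr i k := by rw [h3]; simp
    simp only [rowStepF]
    refine ⟨?_, shape_set2 _ _ _ h2 _ _ _, fun i' j' => ?_⟩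
    · simp only [hgik, h1]
      rw [Finset.sum_range_succ]
    · rw [get2_set2 p.2 n m h2 i k hi (by omega), h3 i' j']
      by_cases hii : i' = i
      · by_cases hjk : j' = k
        · rw [if_pos (⟨hii, hjk⟩ : i' = i ∧ j' = k),
              if_pos (⟨hii, by omega⟩ : i' = i ∧ j' < k + 1), h1, hgik, hjk,
              Finset.sum_range_succ]
        · have hne : ¬ (i' = i ∧ j' = k) := fun hc => hjk hc.2
          rw [if_neg hne]
          by_cases hlt : j' < k
          · rw [if_pos (⟨hii, hlt⟩ : i' = i ∧ j' < k), if_pos (⟨hii, by omega⟩ : i' = i ∧ j' < k + 1)]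
          · rw [if_neg (fun hc => hlt hc.2),
                if_neg (fun hc : i' = i ∧ j' < k + 1 => hjk (by omega))]
      · have hne : ¬ (i' = i ∧ j' = k) := fun hc => hii hc.1
        rw [if_neg hne, if_neg (fun hc => hii hc.1), if_neg (fun hc => hii hc.1)]

lemma rowsAux (n m N M : Nat) (hN : N ≤ n) (hM : M ≤ m) (arr : List (List Int))
    (h : Shape arr n m) :
    ∀ k, k ≤ N →
      Shape ((List.range k).foldl (rowPass M) arr) n m ∧
      (∀ i' j', get2 ((List.range k).foldl (rowPass M) arr) i' j' =
        if i' < k ∧ j' < M then ∑ t ∈ Finset.range (j' + 1), get2 arr i' t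
        else get2 arr i' j') := by
  intro k
  induction k with
  | zero => intro _; exact ⟨h, fun i' j' => by simp⟩
  | succ k ih =>
    intro hk
    obtain ⟨h2, h3⟩ := ih (by omega)
    rw [List.range_succ, List.foldl_append, List.foldl_cons, List.foldl_nil]
    set a2 := (List.range k).foldl (rowPass M) arr with ha2
    obtain ⟨_, hsh, hget⟩ := rowAux n m a2 h2 k (by omega) M hM
    refine ⟨hsh, fun i' j' => ?_⟩
    rw [show rowPass M a2 k = ((List.range M).foldl (rowStepF k) (0, a2)).2 from rfl]
    rw [hget i' j']
    have hrowk : ∀ t, get2 a2 k t = get2 arr k t := by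
      intro t; rw [h3]; simp
    by_cases hik : i' = k
    · subst hik
      by_cases hjM : j' < M
      · rw [if_pos ⟨rfl, hjM⟩, if_pos ⟨by omega, hjM⟩]
        exact Finset.sum_congr rfl fun t _ => hrowk t
      · rw [if_neg (fun hc => hjM hc.2), if_neg (fun hc => hjM hc.2), h3]
        simp
    · rw [if_neg (fun hc => hik hc.1), h3]
      by_cases hlt : i' < k
      · by_cases hjM : j' < M
        · rw [if_pos ⟨hlt, hjM⟩, if_pos ⟨by omega, hjM⟩]
        · rw [if_neg (fun hc => hjM hc.2), if_neg (fun hc => hjM hc.2)]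
      · rw [if_neg (fun hc => hlt hc.1),
            if_neg (fun hc : i' < k + 1 ∧ j' < M => hik (by omega))]

lemma colAux (N M : Nat) (arr2 : List (List Int)) (j : Nat) (hj : j < M)
    (b : List (List Int)) (hb : Shape b N M) (a0 : Int) :
    ∀ k, k ≤ N →
      ((List.range k).foldl (colStepF arr2 j) (0, a0, b)).1 = colpre arr2 k j ∧
      Shape ((List.range k).foldl (colStepF arr2 j) (0, a0, b)).2.2 N M ∧
      (∀ i' j', ¬ (j' = j ∧ i' < k) →
        get2 ((List.range k).foldl (colStepF arr2 j) (0, a0, b)).2.2 i' j' = get2 b i' j') ∧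
      (∀ i', i' < k →
        get2 ((List.range k).foldl (colStepF arr2 j) (0, a0, b)).2.2 i' j
          = get2 b i' j + colpre arr2 (i' + 1) j) ∧
      ((List.range k).foldl (colStepF arr2 j) (0, a0, b)).2.1
        = a0 + ∑ i' ∈ Finset.range k,
            (if get2 b i' j + colpre arr2 (i' + 1) j > 0 then (1 : Int) else 0) := by
  intro k
  induction k with
  | zero =>
    intro _
    exact ⟨by simp [colpre], hb, fun _ _ _ => rfl, fun i' h => absurd h (Nat.not_lt_zero i'), by simp⟩
  | succ k ih =>
    intro hk
    obtain ⟨h1, h2, h3, h4, h5⟩ := ih (by omega)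
    rw [List.range_succ, List.foldl_append, List.foldl_cons, List.foldl_nil]
    set q := (List.range k).foldl (colStepF arr2 j) (0, a0, b) with hq
    have hkN : k < N := by omega
    have hbkj : get2 q.2.2 k j = get2 b k j := h3 k j (fun hc => by omega)
    simp only [colStepF]
    have hcnt : q.1 + get2 arr2 k j = colpre arr2 (k + 1) j := by
      rw [h1]; simp only [colpre]; rw [Finset.sum_range_succ]
    have hget2 := fun i' j' => get2_add2 q.2.2 N M h2 k j hkN hj (q.1 + get2 arr2 k j) i' j'
    have hb2kj : get2 (add2 q.2.2 k j (q.1 + get2 arr2 k j)) k j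
        = get2 b k j + colpre arr2 (k + 1) j := by
      rw [hget2, if_pos ⟨rfl, rfl⟩, hbkj, hcnt]
    refine ⟨hcnt, shape_add2 _ _ _ h2 _ _ _, fun i' j' hne => ?_, fun i' hi' => ?_, ?_⟩
    · rw [hget2, if_neg, h3 i' j' (fun hc => hne ⟨hc.1, by omega⟩)]
      · ring_nf
      · rintro ⟨rfl, rfl⟩; exact hne ⟨rfl, by omega⟩
    · by_cases hik : i' = k
      · subst hik; exact hb2kj
      · rw [hget2, if_neg (fun hc => hik hc.1), h4 i' (by omega)]
        ring_nf
    · rw [Finset.sum_range_succ, hb2kj, h5]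
      split_ifs <;> ring

lemma colsAux (N M : Nat) (arr2 board : List (List Int)) (hb : Shape board N M) :
    ∀ k, k ≤ M →
      Shape ((List.range k).foldl (colPass arr2 N) (0, board)).2 N M ∧
      (∀ i' j', ¬ (j' < k) →
        get2 ((List.range k).foldl (colPass arr2 N) (0, board)).2 i' j' = get2 board i' j') ∧
      ((List.range k).foldl (colPass arr2 N) (0, board)).1
        = ∑ j' ∈ Finset.range k, ∑ i' ∈ Finset.range N,
            (if get2 board i' j' + colpre arr2 (i' + 1) j' > 0 then (1 : Int) else 0) := by
  intro k
  induction k with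
  | zero => intro _; exact ⟨hb, fun _ _ _ => rfl, by simp⟩
  | succ k ih =>
    intro hk
    obtain ⟨h2, h3, h5⟩ := ih (by omega)
    rw [List.range_succ, List.foldl_append, List.foldl_cons, List.foldl_nil]
    set p := (List.range k).foldl (colPass arr2 N) (0, board) with hp
    have hkM : k < M := by omega
    obtain ⟨_, c2, c3, c4, c5⟩ := colAux N M arr2 k hkM p.2 h2 p.1 N (le_refl N)
    simp only [colPass]
    have hcolk : ∀ i', get2 p.2 i' k = get2 board i' k := fun i' => h3 i' k (by omega)
    refine ⟨c2, fun i' j' hne => ?_, ?_⟩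
    · rw [c3 i' j' (fun hc => hne (by omega)), h3 i' j' (by omega)]
    · rw [c5, h5, Finset.sum_range_succ]
      congr 1
      exact Finset.sum_congr rfl fun i' _ => by rw [hcolk i']

-- ===== B-side lemmas =====
lemma rowAdd_length (δ : Int) (cs : List Int) : ∀ row, (rowAdd δ cs row).length = row.length := by
  induction cs with
  | nil => intro row; simp [rowAdd]
  | cons c cs ih =>
    intro row
    rw [show rowAdd δ (c :: cs) row = rowAdd δ cs (row.modify c.toNat (fun x => x + δ)) from rfl,
        ih]
    simp [List.length_modify]

lemma getD_modify_add (row : List Int) (iN : Nat) (δ : Int) (hiN : iN < row.length) (j : Nat) :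
    (row.modify iN (fun x => x + δ))[j]?.getD 0
      = row[j]?.getD 0 + if iN = j then δ else 0 := by
  rw [List.getElem?_modify]
  by_cases h : iN = j
  · subst h
    rw [List.getElem?_eq_getElem hiN]
    simp
  · rcases hj : row[j]? with _ | v <;> simp [h]

lemma rowAdd_getD (δ : Int) (cs : List Int) :
    ∀ row, (∀ c ∈ cs, 0 ≤ c ∧ c.toNat < row.length) →
      ∀ j : Nat, (rowAdd δ cs row)[j]?.getD 0
        = row[j]?.getD 0 + δ * (cs.countP (fun c => decide (c.toNat = j)) : Int) := by
  induction cs with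
  | nil => intro row _ j; simp [rowAdd]
  | cons c cs ih =>
    intro row hcs j
    rw [show rowAdd δ (c :: cs) row = rowAdd δ cs (row.modify c.toNat (fun x => x + δ)) from rfl]
    have hc := hcs c (by simp)
    rw [ih _ (fun c' hc' => by
          have := hcs c' (by simp [hc'])
          simpa [List.length_modify] using this) j,
        getD_modify_add row c.toNat δ hc.2 j, List.countP_cons]
    by_cases h : c.toNat = j <;> simp [h] <;> ring

lemma get2_modifyRow (b : List (List Int)) (i' : Nat) (f : List Int → List Int) (i j : Nat) :
    get2 (b.modify i' f) i j
      = if i' = i ∧ i < b.length then (f (b[i]?.getD []))[j]?.getD 0 else get2 b i j := by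
  rw [get2_eq, get2_eq, List.getElem?_modify]
  by_cases h : i' = i
  · subst h
    by_cases hlen : i' < b.length
    · rw [List.getElem?_eq_getElem hlen]
      simp [hlen]
    · rw [show b[i']? = none from List.getElem?_eq_none (by omega)]
      simp [hlen]
  · rcases hb : b[i]? with _ | row <;> simp [h]

lemma foldRows (δ : Int) (cs : List Int) (N M : Nat)
    (hcs : ∀ c ∈ cs, 0 ≤ c ∧ c.toNat < M) :
    ∀ (rs : List Int), (∀ r ∈ rs, 0 ≤ r ∧ r.toNat < N) → ∀ b, Shape b N M →
      Shape (rs.foldl (fun b r => b.modify r.toNat (rowAdd δ cs)) b) N M ∧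
      ∀ i j, get2 (rs.foldl (fun b r => b.modify r.toNat (rowAdd δ cs)) b) i j
        = get2 b i j + δ * (rs.countP (fun r => decide (r.toNat = i)) : Int)
            * (cs.countP (fun c => decide (c.toNat = j)) : Int) := by
  intro rs
  induction rs with
  | nil => intro _ b hb; exact ⟨hb, fun i j => by simp⟩
  | cons r rs ih =>
    intro hrs b hb
    have hr := hrs r (by simp)
    have hbshape : Shape (b.modify r.toNat (rowAdd δ cs)) N M :=
      shape_modify b N M hb r.toNat _ (rowAdd_length δ cs)
    obtain ⟨sh, hg⟩ := ih (fun r' hr' => hrs r' (by simp [hr'])) _ hbshape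
    refine ⟨sh, fun i j => ?_⟩
    rw [List.foldl_cons, hg i j, get2_modifyRow]
    have hrowlen : i < b.length → M ≤ (b[i]?.getD []).length := by
      intro hi
      exact hb.2 i (hb.1 ▸ hi)
    rw [List.countP_cons]
    by_cases hri : r.toNat = i
    · have hiN : i < b.length := hb.1 ▸ (hri ▸ hr.2)
      rw [if_pos ⟨hri, hiN⟩]
      rw [rowAdd_getD δ cs _ (fun c hc => ⟨(hcs c hc).1, lt_of_lt_of_le (hcs c hc).2 (hrowlen hiN)⟩) j]
      rw [← get2_eq]
      simp only [hri, decide_true]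
      push_cast
      ring
    · rw [if_neg (fun hc => hri hc.1)]
      simp only [hri, decide_false]
      push_cast
      ring

lemma countP_pyRange : ∀ (fuel : Nat) (a b : Int), (b - a).toNat ≤ fuel → 0 ≤ a → ∀ j : Nat,
    ((PySem.List.pyRange a b).countP (fun c => decide (c.toNat = j)) : Int)
      = if a ≤ (j : Int) ∧ (j : Int) < b then 1 else 0 := by
  intro fuel
  induction fuel with
  | zero =>
    intro a b hf ha j
    have hba : b ≤ a := by omega
    rw [PySem.List.pyRange_one_eq_nil hba]
    simp only [List.countP_nil]
    rw [if_neg (by omega)]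
    simp
  | succ fuel ih =>
    intro a b hf ha j
    by_cases hba : b ≤ a
    · rw [PySem.List.pyRange_one_eq_nil hba]
      simp only [List.countP_nil]
      rw [if_neg (by omega)]
      simp
    · have hab : a < b := by omega
      rw [PySem.List.pyRange_one_cons hab, List.countP_cons]
      push_cast [ih (a + 1) b (by omega) (by omega) j]
      have haj : (decide (a.toNat = j) = true) = ((j : Int) = a) := by
        simp only [decide_eq_true_eq]
        exact propext (by omega)
      simp only [haj]
      split_ifs <;> omega

lemma get2_stepB (N M : Nat) (sk : List Int) (hok : okSk N M sk = true)
    (b : List (List Int)) (hb : Shape b N M) :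
    Shape (stepB b sk) N M ∧
      ∀ i j, get2 (stepB b sk) i j = get2 b i j + contrib sk i j := by
  obtain ⟨t, r1, c1, r2, c2, d, rfl, h0, h1, h2, h3, h4, h5⟩ := okSk_shape hok
  simp only [stepB]
  have hcs : ∀ c ∈ PySem.List.pyRange c1 (c2 + 1), 0 ≤ c ∧ c.toNat < M := by
    intro c hc
    rw [PySem.List.mem_pyRange_one] at hc
    omega
  have hrs : ∀ r ∈ PySem.List.pyRange r1 (r2 + 1), 0 ≤ r ∧ r.toNat < N := by
    intro r hr
    rw [PySem.List.mem_pyRange_one] at hr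
    omega
  obtain ⟨sh, hg⟩ := foldRows (if t == 1 then -d else d) (PySem.List.pyRange c1 (c2 + 1)) N M
    hcs (PySem.List.pyRange r1 (r2 + 1)) hrs b hb
  refine ⟨sh, fun i j => ?_⟩
  rw [hg i j, countP_pyRange ((r2 + 1) - r1).toNat r1 (r2 + 1) (le_refl _) h0 i,
      countP_pyRange ((c2 + 1) - c1).toNat c1 (c2 + 1) (le_refl _) h3 j]
  simp only [contrib]
  split_ifs <;> (try ring) <;> omega

lemma get2_foldB (N M : Nat) (skill : List (List Int))
    (hok : ∀ sk ∈ skill, okSk N M sk = true) :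
    ∀ b, Shape b N M →
      Shape (skill.foldl stepB b) N M ∧
      ∀ i j, get2 (skill.foldl stepB b) i j = get2 b i j + Tsum skill i j := by
  induction skill with
  | nil => intro b hb; exact ⟨hb, fun i j => by simp [Tsum]⟩
  | cons sk rest ih =>
    intro b hb
    obtain ⟨sh, hg⟩ := get2_stepB N M sk (hok sk (by simp)) b hb
    obtain ⟨sh2, hg2⟩ := ih (fun s hs => hok s (by simp [hs])) (stepB b sk) sh
    refine ⟨sh2, fun i j => ?_⟩
    rw [List.foldl_cons, hg2 i j, hg i j]
    simp [Tsum]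
    ring

-- ===== counting and prefix-sum identities =====
lemma countP_range_eq (M : Nat) (p : Nat → Bool) :
    (((List.range M).countP p : Nat) : Int)
      = ∑ j ∈ Finset.range M, (if p j = true then (1 : Int) else 0) := by
  induction M with
  | zero => simp
  | succ M ih =>
    rw [List.range_succ, List.countP_append, Finset.sum_range_succ]
    push_cast [ih]
    by_cases h : p M = true <;> simp [h, List.countP_cons]

lemma sum_map_range (N : Nat) (f : Nat → Int) :
    ((List.range N).map f).sum = ∑ i ∈ Finset.range N, f i := by
  induction N with
  | zero => simp
  | succ N ih =>
    rw [List.range_succ, List.map_append, List.sum_append, Finset.sum_range_succ, ih]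
    simp

lemma sum_indicator_eq (x : Int) (hx : 0 ≤ x) (n : Nat) :
    (∑ t ∈ Finset.range n, if (t : Int) = x then (1 : Int) else 0)
      = if x < (n : Int) then 1 else 0 := by
  have hcond : ∀ t : Nat, ((t : Int) = x) = (t = x.toNat) := fun t => propext (by omega)
  simp only [hcond]
  rw [Finset.sum_ite_eq' (Finset.range n) x.toNat (fun _ => (1 : Int))]
  have : (x.toNat ∈ Finset.range n) = (x < (n : Int)) := propext (by
    rw [Finset.mem_range]; omega)
  simp only [this]

lemma double_sum_factor (A B : Finset Nat) (F G : Nat → Int) (K : Int) :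
    (∑ t ∈ A, ∑ u ∈ B, F t * G u * K) = (∑ t ∈ A, F t) * (∑ u ∈ B, G u) * K := by
  rw [Finset.sum_mul_sum, Finset.sum_mul]
  refine Finset.sum_congr rfl fun t _ => ?_
  rw [Finset.sum_mul]

lemma corner_prefix (N M : Nat) (sk : List Int) (hok : okSk N M sk = true)
    (i j : Nat) (_hi : i < N) (_hj : j < M) :
    (∑ t ∈ Finset.range (i + 1), ∑ u ∈ Finset.range (j + 1), corner sk t u)
      = contrib sk i j := by
  obtain ⟨t, r1, c1, r2, c2, d, rfl, h0, h1, h2, h3, h4, h5⟩ := okSk_shape hok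
  simp only [corner, contrib]
  rw [double_sum_factor]
  rw [Finset.sum_sub_distrib, Finset.sum_sub_distrib,
      sum_indicator_eq r1 h0, sum_indicator_eq (r2 + 1) (by omega),
      sum_indicator_eq c1 h3, sum_indicator_eq (c2 + 1) (by omega)]
  push_cast
  split_ifs <;> (try ring) <;> omega

lemma csum_prefix (N M : Nat) (skill : List (List Int))
    (hok : ∀ sk ∈ skill, okSk N M sk = true) (i j : Nat) (hi : i < N) (hj : j < M) :
    (∑ t ∈ Finset.range (i + 1), ∑ u ∈ Finset.range (j + 1), Csum skill t u)
      = Tsum skill i j := by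
  induction skill with
  | nil => simp [Csum, Tsum]
  | cons sk rest ih =>
    have : ∀ t u, Csum (sk :: rest) t u = corner sk t u + Csum rest t u := by
      intro t u; simp [Csum]
    simp only [this]
    have ht : Tsum (sk :: rest) i j = contrib sk i j + Tsum rest i j := by simp [Tsum]
    rw [ht]
    rw [← ih (fun s hs => hok s (by simp [hs]))]
    rw [← corner_prefix N M sk (hok sk (by simp)) i j hi hj]
    rw [← Finset.sum_add_distrib]
    refine Finset.sum_congr rfl fun t _ => ?_
    rw [← Finset.sum_add_distrib]

lemma pyGet0_headD (board : List (List Int)) (hne : board ≠ []) :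
    (PySem.List.pyGet? board 0).getD [] = board.headD [] := by
  cases board with
  | nil => exact absurd rfl hne
  | cons r rest => simp [PySem.List.pyGet?, PySem.List.pyIdx?]

lemma board_shape (board : List (List Int))
    (hrect : ∀ row ∈ board, (board.headD []).length ≤ row.length) :
    Shape board board.length (board.headD []).length := by
  refine ⟨rfl, fun k hk => ?_⟩
  rw [List.getElem?_eq_getElem hk]
  exact hrect _ (List.getElem_mem hk)

lemma arr0_shape (N M : Nat) :
    Shape (List.replicate (N + 1) (List.replicate (M + 1) (0 : Int))) (N + 1) (M + 1) := by
  refine ⟨by simp, fun k hk => ?_⟩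
  rw [List.getElem?_replicate, if_pos hk]
  simp

lemma arr0_get (N M : Nat) (i j : Nat) :
    get2 (List.replicate (N + 1) (List.replicate (M + 1) (0 : Int))) i j = 0 := by
  rw [get2_eq, List.getElem?_replicate]
  split_ifs <;> simp [List.getElem?_replicate] <;> split_ifs <;> simp

-- ===== VERDICT (by name: the statement is the Claim_ definition above) =====
theorem solution_spec : Claim_equal_solution := by
  intro board skill _hdom hpre
  obtain ⟨hne, hrect, hok⟩ := hpre
  unfold Spec_solution solution solution_alt
  rw [pyGet0_headD board hne]
  set N := board.length with hNdef
  set M := (board.headD []).length with hMdef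
  have hshape : Shape board N M := board_shape board hrect
  -- A side
  set arr1 := skill.foldl stepA (List.replicate (N + 1) (List.replicate (M + 1) (0 : Int)))
    with harr1def
  obtain ⟨sharr1, hgarr1⟩ := get2_foldA N M skill hok _ (arr0_shape N M)
  have hgarr1' : ∀ i j, get2 arr1 i j = Csum skill i j := by
    intro i j
    rw [harr1def, hgarr1, arr0_get]
    ring
  set arr2 := (List.range N).foldl (rowPass M) arr1 with harr2def
  obtain ⟨sharr2, hgarr2⟩ := rowsAux (N + 1) (M + 1) N M (by omega) (by omega) arr1 sharr1 N
    (le_refl N)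
  obtain ⟨_, _, hans⟩ := colsAux N M arr2 board hshape M (le_refl M)
  rw [hans]
  -- the accumulated column prefix is exactly Tsum
  have hcol : ∀ i j, i < N → j < M → colpre arr2 (i + 1) j = Tsum skill i j := by
    intro i j hi hj
    unfold colpre
    have hterm : ∀ t ∈ Finset.range (i + 1), get2 arr2 t j
        = ∑ u ∈ Finset.range (j + 1), Csum skill t u := by
      intro t ht
      rw [Finset.mem_range] at ht
      rw [harr2def, hgarr2 t j, if_pos ⟨by omega, hj⟩]
      exact Finset.sum_congr rfl fun u _ => hgarr1' t u
    rw [Finset.sum_congr rfl hterm]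
    exact csum_prefix N M skill hok i j hi hj
  -- B side
  obtain ⟨shB, hgB⟩ := get2_foldB N M skill hok board hshape
  set bB := skill.foldl stepB board with hbBdef
  rw [sum_map_range]
  calc (∑ j' ∈ Finset.range M, ∑ i' ∈ Finset.range N,
          if get2 board i' j' + colpre arr2 (i' + 1) j' > 0 then (1 : Int) else 0)
      = ∑ j' ∈ Finset.range M, ∑ i' ∈ Finset.range N,
          (if get2 bB i' j' > 0 then (1 : Int) else 0) := by
        refine Finset.sum_congr rfl fun j' hj' => Finset.sum_congr rfl fun i' hi' => ?_
        rw [Finset.mem_range] at hj' hi'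
        rw [hcol i' j' hi' hj', hgB i' j']
    _ = ∑ i' ∈ Finset.range N, ∑ j' ∈ Finset.range M,
          (if get2 bB i' j' > 0 then (1 : Int) else 0) := Finset.sum_comm
    _ = ∑ i' ∈ Finset.range N,
          (((List.range M).countP (fun j => decide (get2 bB i' j > 0)) : Nat) : Int) := by
        refine Finset.sum_congr rfl fun i' _ => ?_
        rw [countP_range_eq]
        exact Finset.sum_congr rfl fun j' _ => by simp
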